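-- pv_equiv track=rewrite | github.com/OTalDoL2/sistema-cadastro-tarefa | Relatorio.py | calculate_max_y
-- ===== SOURCE A (Python) =====
-- def calculate_max_y(df, level):
--     const_variacao_y = 9
--     y_max = 4 + const_variacao_y * 0
--     for i in range(len(df)):
--         if i == 2:
--             const_variacao_y = 8
--
--         y_max = 4 + const_variacao_y * i
--
--     if level == 2:
--         y_max += 12
--     return y_max + 2
-- ===== SOURCE B (Python) =====
-- def calculate_max_y(df, level):
--     n = len(df)
--     if n == 0:
--         y = 4
--     else:
--         y = 4 + (8 if n >= 3 else 9) * (n - 1)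
--     if level == 2:
--         y += 12
--     return y + 2
-- ===== Notes on version B (the rewrite author's own statement) =====
-- stated objective: faster
-- what changed: Replaced the O(n) loop over range(len(df)) with a closed-form formula: y = 4 + (8 if len>=3 else 9)*(len-1) for nonempty df, 4 otherwise.
import Mathlib
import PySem

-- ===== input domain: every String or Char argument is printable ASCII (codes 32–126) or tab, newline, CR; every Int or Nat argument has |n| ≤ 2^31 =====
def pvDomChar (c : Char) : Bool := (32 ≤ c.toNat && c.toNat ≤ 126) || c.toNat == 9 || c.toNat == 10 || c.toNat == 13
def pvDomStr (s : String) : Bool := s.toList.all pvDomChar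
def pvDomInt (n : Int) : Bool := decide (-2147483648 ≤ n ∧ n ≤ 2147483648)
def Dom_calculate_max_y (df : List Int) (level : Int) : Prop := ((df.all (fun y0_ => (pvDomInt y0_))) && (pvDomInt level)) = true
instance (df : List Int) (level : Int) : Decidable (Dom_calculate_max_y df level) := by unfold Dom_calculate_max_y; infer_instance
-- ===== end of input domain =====

-- B replaces A's O(n) loop over range(len(df)) with an O(1) closed-form formula.


-- ===== PORT A =====
-- literal port: fold the loop body over range(len(df)) with state (const_variacao_y, y_max)
def calculate_max_y (df : List Int) (level : Int) : Int :=
  let st := (PySem.List.pyRange 0 (df.length : Int) 1).foldl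
    (fun (s : Int × Int) i =>
      let c := if i == 2 then 8 else s.1
      (c, 4 + c * i)) (9, 4 + 9 * 0)
  let y_max := if level == 2 then st.2 + 12 else st.2
  y_max + 2

-- ===== PORT B =====
-- closed form
def calculate_max_y_alt (df : List Int) (level : Int) : Int :=
  let n : Int := df.length
  let y : Int := if n = 0 then 4 else 4 + (if n ≥ 3 then 8 else 9) * (n - 1)
  let y' := if level == 2 then y + 12 else y
  y' + 2

-- ===== PRECONDITION & SPEC =====
def Spec_calculate_max_y (df : List Int) (level : Int) (out : Int) : Prop := out = calculate_max_y_alt df level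
instance (df : List Int) (level : Int) (out : Int) : Decidable (Spec_calculate_max_y df level out) := by unfold Spec_calculate_max_y; infer_instance

-- ===== CLAIM (what is proved, stated in full; the proofs are below) =====
def Claim_equal_calculate_max_y : Prop := ∀ (df : List Int) (level : Int), Dom_calculate_max_y df level → Spec_calculate_max_y df level (calculate_max_y df level)

-- ===== LEMMAS AND PROOFS =====

def pvStep (s : Int × Int) (i : Int) : Int × Int :=
  let c := if i == 2 then 8 else s.1
  (c, 4 + c * i)

-- loop characterisation: after folding over range(0,n), the state is as B computes
theorem pvLoop (n : Nat) :
    (PySem.List.pyRange 0 (n : Int) 1).foldl pvStep (9, 4 + 9 * 0) =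
      (if (n : Int) ≥ 3 then 8 else 9,
       if (n : Int) = 0 then 4 else 4 + (if (n : Int) ≥ 3 then 8 else 9) * ((n : Int) - 1)) := by
  induction n with
  | zero => decide
  | succ m ih =>
    rw [show ((m + 1 : Nat) : Int) = (m : Int) + 1 by push_cast; ring,
        PySem.List.pyRange_one_succ_right (by positivity), List.foldl_append, ih]
    simp only [List.foldl, pvStep]
    by_cases h : m < 3
    · interval_cases m <;> norm_num
    · have hm3 : (3 : Int) ≤ (m : Int) := by exact_mod_cast Nat.le_of_not_lt h
      have h2 : ((m : Int) == 2) = false := by simp; omega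
      have hg : ((m : Int) ≥ 3) = True := by simp; omega
      have hg1 : ((m : Int) + 1 ≥ 3) = True := by simp; omega
      have h0 : ((m : Int) = 0) = False := by simp; omega
      have h01 : ((m : Int) + 1 = 0) = False := by simp; omega
      simp only [h2, hg, hg1, h01, if_true, if_false]
      norm_num

-- ===== VERDICT (by name: the statement is the Claim_ definition above) =====
theorem calculate_max_y_spec : Claim_equal_calculate_max_y := by
  intro df level _
  unfold Spec_calculate_max_y calculate_max_y calculate_max_y_alt
  have := pvLoop df.length
  simp only [show (fun (s : Int × Int) i =>
      let c := if i == 2 then 8 else s.1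
      (c, 4 + c * i)) = pvStep from rfl]
  rw [this]
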